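-- pv_equiv track=rewrite | github.com/nicopop/ManualApWorlds | worlds/ori_wotw/Extractors/extract_rules.py | order_or
-- ===== SOURCE A (Python) =====
-- from typing import Dict, List
--
-- en_skills = ["Bow", "Grenade", "Flash", "Sentry", "Shuriken", "Spear", "Blaze"]  # Skills that require energy
--
-- combat_name = ["BreakWall", "Combat", "Boss"]
--
-- inf_skills = ["Sword", "DoubleJump", "Regenerate", "Dash", "Bash", "Grapple", "Glide", "Flap", "WaterDash",
--               "Burrow", "Launch", "Water", "WaterBreath", "Hammer", "free"]
--
-- glitches = {"ShurikenBreak": ["Shuriken"],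
--             "SentryJump": ["Sentry"],
--             "SwordSJump": ["Sword", "Sentry"],
--             "HammerSJump": ["Hammer", "Sentry"],
--             "SentryBurn": ["Sentry"],
--             "SentryBreak": ["Sentry"],
--             "SpearBreak": ["Spear"],
--             "SentrySwap": ["Sentry"],
--             "BlazeSwap": ["Blaze"],
--             "GrenadeRedirect": ["Grenade"],
--             "SentryRedirect": ["Sentry"],
--             "SpearJump": ["Spear"]}
--
-- inf_glitches = {"RemoveKillPlane": "free",
--                 "HammerBreak": "Hammer",
--                 "LaunchSwap": "Launch",
--                 "FlashSwap": "Flash",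
--                 "GrenadeJump": "Grenade",
--                 "GrenadeCancel": "Grenade",
--                 "BowCancel": "Bow",
--                 "PauseHover": "free",
--                 "GlideJump": "Glide"}
--
-- other_glitches = ["WaveDash", "HammerJump", "SwordJump", "GlideHammerJump"]
--
-- def order_or(or_chain: List[str]) -> (List[str], List[str], List[str]):
--     """Parse the list of requirements in the `or` chain, and categorize them."""
--     or_skills = []  # Stores inf_skills
--     or_glitch = []  # Stores the glitches
--     or_resource = []  # Stores requirements that need resources
--
--     for requirement in or_chain:
--         if "=" in requirement:
--             elem = requirement.split("=")[0]
--         else: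
--             elem = requirement
--
--         if elem in other_glitches or elem in inf_glitches.keys() or elem in glitches.keys():  # Handle the glitches
--             or_glitch.append(requirement)
--
--         elif elem in inf_skills:
--             or_skills.append(requirement)
--         elif elem in en_skills or elem in combat_name or elem == "Damage":
--             or_resource.append(requirement)
--         else:  # Case of an event
--             or_skills.append(requirement)
--     return or_skills, or_glitch, or_resource
-- ===== SOURCE B (Python) =====
-- from typing import List
--
-- en_skills = ["Bow", "Grenade", "Flash", "Sentry", "Shuriken", "Spear", "Blaze"]
--
-- combat_name = ["BreakWall", "Combat", "Boss"]
--
-- inf_skills = ["Sword", "DoubleJump", "Regenerate", "Dash", "Bash", "Grapple", "Glide", "Flap", "WaterDash",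
--               "Burrow", "Launch", "Water", "WaterBreath", "Hammer", "free"]
--
-- glitches = {"ShurikenBreak": ["Shuriken"],
--             "SentryJump": ["Sentry"],
--             "SwordSJump": ["Sword", "Sentry"],
--             "HammerSJump": ["Hammer", "Sentry"],
--             "SentryBurn": ["Sentry"],
--             "SentryBreak": ["Sentry"],
--             "SpearBreak": ["Spear"],
--             "SentrySwap": ["Sentry"],
--             "BlazeSwap": ["Blaze"],
--             "GrenadeRedirect": ["Grenade"],
--             "SentryRedirect": ["Sentry"],
--             "SpearJump": ["Spear"]}
--
-- inf_glitches = {"RemoveKillPlane": "free",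
--                 "HammerBreak": "Hammer",
--                 "LaunchSwap": "Launch",
--                 "FlashSwap": "Flash",
--                 "GrenadeJump": "Grenade",
--                 "GrenadeCancel": "Grenade",
--                 "BowCancel": "Bow",
--                 "PauseHover": "free",
--                 "GlideJump": "Glide"}
--
-- other_glitches = ["WaveDash", "HammerJump", "SwordJump", "GlideHammerJump"]
--
-- # Category of each known name; anything absent (events, inf_skills) defaults to "skill".
-- _CATEGORY = {**dict.fromkeys(other_glitches, "glitch"),
--              **dict.fromkeys(inf_glitches, "glitch"),
--              **dict.fromkeys(glitches, "glitch"),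
--              **dict.fromkeys(en_skills, "resource"),
--              **dict.fromkeys(combat_name, "resource"),
--              "Damage": "resource"}
--
--
-- def order_or(or_chain: List[str]) -> (List[str], List[str], List[str]):
--     """Parse the list of requirements in the `or` chain, and categorize them."""
--     tagged = [(_CATEGORY.get(requirement.split("=")[0] if "=" in requirement else requirement,
--                              "skill"), requirement)
--               for requirement in or_chain]
--     return ([r for t, r in tagged if t == "skill"],
--             [r for t, r in tagged if t == "glitch"],
--             [r for t, r in tagged if t == "resource"])
-- ===== Notes on version B (the rewrite author's own statement) =====
-- stated objective: idiomatic
-- what changed: Replaces A's three membership-test branches per element with a single name-to-category dict built once (glitch/resource, default skill), and builds the three outputs by tagging each requirement once and filtering, instead of A's branching fold over three accumulators.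
import Mathlib
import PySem

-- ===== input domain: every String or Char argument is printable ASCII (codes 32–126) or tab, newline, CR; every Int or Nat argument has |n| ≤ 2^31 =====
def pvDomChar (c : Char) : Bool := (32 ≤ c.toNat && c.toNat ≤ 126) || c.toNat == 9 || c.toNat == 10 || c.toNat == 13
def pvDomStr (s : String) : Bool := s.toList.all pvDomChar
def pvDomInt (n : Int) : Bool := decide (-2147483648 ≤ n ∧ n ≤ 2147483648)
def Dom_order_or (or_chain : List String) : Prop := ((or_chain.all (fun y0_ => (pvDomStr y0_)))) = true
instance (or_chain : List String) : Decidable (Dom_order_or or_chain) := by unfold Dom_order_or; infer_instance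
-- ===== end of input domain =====

set_option maxRecDepth 40000

-- B replaces A's three membership-test branches by one precomputed name→category table and
-- builds the three output lists by tagging each requirement once and filtering (objective: idiomatic).

-- module-level constants shared by both Python files
def en_skills : List String := ["Bow", "Grenade", "Flash", "Sentry", "Shuriken", "Spear", "Blaze"]
def combat_name : List String := ["BreakWall", "Combat", "Boss"]
def inf_skills : List String := ["Sword", "DoubleJump", "Regenerate", "Dash", "Bash", "Grapple", "Glide",
  "Flap", "WaterDash", "Burrow", "Launch", "Water", "WaterBreath", "Hammer", "free"]
def glitches : PySem.Dict String (List String) := PySem.Dict.ofList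
  [("ShurikenBreak", ["Shuriken"]), ("SentryJump", ["Sentry"]), ("SwordSJump", ["Sword", "Sentry"]),
   ("HammerSJump", ["Hammer", "Sentry"]), ("SentryBurn", ["Sentry"]), ("SentryBreak", ["Sentry"]),
   ("SpearBreak", ["Spear"]), ("SentrySwap", ["Sentry"]), ("BlazeSwap", ["Blaze"]),
   ("GrenadeRedirect", ["Grenade"]), ("SentryRedirect", ["Sentry"]), ("SpearJump", ["Spear"])]
def inf_glitches : PySem.Dict String String := PySem.Dict.ofList
  [("RemoveKillPlane", "free"), ("HammerBreak", "Hammer"), ("LaunchSwap", "Launch"),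
   ("FlashSwap", "Flash"), ("GrenadeJump", "Grenade"), ("GrenadeCancel", "Grenade"),
   ("BowCancel", "Bow"), ("PauseHover", "free"), ("GlideJump", "Glide")]
def other_glitches : List String := ["WaveDash", "HammerJump", "SwordJump", "GlideHammerJump"]

-- `requirement.split("=")[0] if "=" in requirement else requirement` — identical in both sources.
-- split? is some for a nonempty separator and its result is nonempty, so the "" defaults are never hit.
def elemOf (requirement : String) : String :=
  if PySem.Str.isIn "=" requirement then
    (PySem.List.pyGet? ((PySem.Str.split? requirement "=").getD []) 0).getD ""
  else requirement

-- ===== PORT A =====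
def order_or (or_chain : List String) : List String × List String × List String :=
  or_chain.foldl
    (fun acc requirement =>
      let elem := elemOf requirement
      if other_glitches.contains elem || (inf_glitches.keys).contains elem
          || (glitches.keys).contains elem then
        (acc.1, acc.2.1 ++ [requirement], acc.2.2)
      else if inf_skills.contains elem then
        (acc.1 ++ [requirement], acc.2.1, acc.2.2)
      else if en_skills.contains elem || combat_name.contains elem || elem == "Damage" then
        (acc.1, acc.2.1, acc.2.2 ++ [requirement])
      else
        (acc.1 ++ [requirement], acc.2.1, acc.2.2))
    ([], [], [])

-- ===== PORT B =====
-- Source B's _CATEGORY: a merge of dict.fromkeys tables with pairwise-distinct keys = this association dict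
def categoryD : PySem.Dict String String := PySem.Dict.ofList
  (other_glitches.map (fun n => (n, "glitch"))
   ++ (inf_glitches.keys).map (fun n => (n, "glitch"))
   ++ (glitches.keys).map (fun n => (n, "glitch"))
   ++ en_skills.map (fun n => (n, "resource"))
   ++ combat_name.map (fun n => (n, "resource"))
   ++ [("Damage", "resource")])

def order_or_alt (or_chain : List String) : List String × List String × List String :=
  let tagged := or_chain.map (fun requirement => (categoryD.getD (elemOf requirement) "skill", requirement))
  ((tagged.filter (fun p => p.1 == "skill")).map (fun p => p.2),
   (tagged.filter (fun p => p.1 == "glitch")).map (fun p => p.2),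
   (tagged.filter (fun p => p.1 == "resource")).map (fun p => p.2))

-- ===== PRECONDITION & SPEC =====
def Spec_order_or (or_chain : List String) (out : List String × List String × List String) : Prop := out = order_or_alt or_chain
instance (or_chain : List String) (out : List String × List String × List String) : Decidable (Spec_order_or or_chain out) := by unfold Spec_order_or; infer_instance

-- ===== CLAIM (what is proved, stated in full; the proofs are below) =====
def Claim_equal_order_or : Prop := ∀ (or_chain : List String), Dom_order_or or_chain → Spec_order_or or_chain (order_or or_chain)

-- ===== LEMMAS AND PROOFS =====

-- first-match lookup in a constant-valued block of the table
theorem get?_mk_map_const (names : List String) (v : String) (rest : List (String × String)) (x : String) :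
    (PySem.Dict.mk (names.map (fun n => (n, v)) ++ rest)).get? x
      = if names.contains x then some v else (PySem.Dict.mk rest).get? x := by
  induction names with
  | nil => simp
  | cons a names ih =>
      by_cases h : a = x
      · subst h
        simp [PySem.Dict.get?_mk_cons]
      · rw [List.map_cons, List.cons_append, PySem.Dict.get?_mk_cons, if_neg (by simpa using h), ih]
        simp [(show ¬ x = a from fun hx => h hx.symm)]

theorem categoryD_eq : categoryD = PySem.Dict.mk
    (other_glitches.map (fun n => (n, "glitch"))
     ++ (inf_glitches.keys).map (fun n => (n, "glitch"))
     ++ (glitches.keys).map (fun n => (n, "glitch"))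
     ++ en_skills.map (fun n => (n, "resource"))
     ++ combat_name.map (fun n => (n, "resource"))
     ++ [("Damage", "resource")]) := by decide

-- the table lookup computes exactly A's branch conditions (in A's priority order)
theorem tag_eq (e : String) : categoryD.getD e "skill" =
    if other_glitches.contains e || (inf_glitches.keys).contains e || (glitches.keys).contains e then "glitch"
    else if en_skills.contains e || combat_name.contains e || e == "Damage" then "resource"
    else "skill" := by
  rw [categoryD_eq, PySem.Dict.getD_eq_get?_getD]
  rw [show (other_glitches.map (fun n => (n, "glitch"))
     ++ (inf_glitches.keys).map (fun n => (n, "glitch"))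
     ++ (glitches.keys).map (fun n => (n, "glitch"))
     ++ en_skills.map (fun n => (n, "resource"))
     ++ combat_name.map (fun n => (n, "resource"))
     ++ [("Damage", "resource")])
    = ((other_glitches ++ inf_glitches.keys ++ glitches.keys).map (fun n => (n, "glitch"))
       ++ ((en_skills ++ combat_name ++ ["Damage"]).map (fun n => (n, "resource")) ++ [])) by simp]
  rw [get?_mk_map_const, get?_mk_map_const]
  have hgl : (other_glitches ++ inf_glitches.keys ++ glitches.keys).contains e
      = (other_glitches.contains e || (inf_glitches.keys).contains e || (glitches.keys).contains e) := by
    simp [Bool.or_assoc]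
  have hres : (en_skills ++ combat_name ++ ["Damage"]).contains e
      = (en_skills.contains e || combat_name.contains e || e == "Damage") := by
    have hd : (e == "Damage") = decide (e = "Damage") := by
      by_cases h : e = "Damage" <;> simp [h]
    simp [Bool.or_assoc, hd]
  rw [hgl, hres]
  split_ifs <;> simp [PySem.Dict.get?]

-- inf_skills never names a resource, so A's middle branch also lands on the table's "skill" default
theorem inf_skills_not_resource : ∀ e ∈ inf_skills,
    (en_skills.contains e || combat_name.contains e || e == "Damage") = false := by decide

theorem loop_eq (l : List String) (s g r : List String) :
    l.foldl
      (fun acc requirement =>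
        let elem := elemOf requirement
        if other_glitches.contains elem || (inf_glitches.keys).contains elem
            || (glitches.keys).contains elem then
          (acc.1, acc.2.1 ++ [requirement], acc.2.2)
        else if inf_skills.contains elem then
          (acc.1 ++ [requirement], acc.2.1, acc.2.2)
        else if en_skills.contains elem || combat_name.contains elem || elem == "Damage" then
          (acc.1, acc.2.1, acc.2.2 ++ [requirement])
        else
          (acc.1 ++ [requirement], acc.2.1, acc.2.2))
      (s, g, r)
    = (s ++ (order_or_alt l).1, g ++ (order_or_alt l).2.1, r ++ (order_or_alt l).2.2) := by
  induction l generalizing s g r with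
  | nil => simp [order_or_alt]
  | cons a l ih =>
      simp only [List.foldl_cons]
      by_cases h1 : (other_glitches.contains (elemOf a) || (inf_glitches.keys).contains (elemOf a)
          || (glitches.keys).contains (elemOf a)) = true
      · simp only [h1, if_true, ih, order_or_alt, List.map_cons, List.filter_cons, tag_eq]
        simp
      · by_cases h2 : inf_skills.contains (elemOf a) = true
        · have h3 := inf_skills_not_resource (elemOf a) (by simpa using h2)
          simp only [Bool.not_eq_true] at h1
          simp only [h1, h2, if_true, if_false, Bool.false_eq_true, ih,
            order_or_alt, List.map_cons, List.filter_cons, tag_eq, h3]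
          simp
        · by_cases h3 : (en_skills.contains (elemOf a) || combat_name.contains (elemOf a)
              || elemOf a == "Damage") = true
          all_goals
            simp only [Bool.not_eq_true] at h1 h2 h3 ⊢
            simp only [h1, h2, h3, if_true, if_false, Bool.false_eq_true, ih,
              order_or_alt, List.map_cons, List.filter_cons, tag_eq]
            simp

-- ===== VERDICT (by name: the statement is the Claim_ definition above) =====
theorem order_or_spec : Claim_equal_order_or := by
  intro or_chain _
  unfold Spec_order_or order_or
  rw [loop_eq]
  simp
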